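-- pv_equiv track=rewrite | github.com/paulc-arc/testpilot | plugins/wifi_llapi/plugin.py | _preprocess_script_lines
-- ===== SOURCE A (Python) =====
-- def _preprocess_script_lines(script: str) -> list[str]:
--     raw_lines: list[str] = []
--     pending: str | None = None
--     for raw in script.splitlines():
--         stripped = raw.strip()
--         if not stripped:
--             continue
--         if pending is not None:
--             pending = pending + "\n" + stripped
--             if pending.count("'") % 2 == 0:
--                 raw_lines.append(pending)
--                 pending = None
--         elif stripped.count("'") % 2 != 0:
--             pending = stripped
--         else:
--             raw_lines.append(stripped)
--     if pending is not None:
--         raw_lines.append(pending)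
--     return raw_lines
-- ===== SOURCE B (Python) =====
-- def _preprocess_script_lines(script: str) -> list[str]:
--     out: list[str] = []
--     buf: list[str] = []
--     odd = False
--     for raw in script.splitlines():
--         stripped = raw.strip()
--         if not stripped:
--             continue
--         buf.append(stripped)
--         odd ^= stripped.count("'") % 2 == 1
--         if not odd:
--             out.append("\n".join(buf))
--             buf = []
--     if buf:
--         out.append("\n".join(buf))
--     return out
-- ===== Notes on version B (the rewrite author's own statement) =====
-- stated objective: alternative
-- what changed: B keeps a list buffer of stripped lines plus an incrementally XOR-maintained quote-parity bit and flushes by newline-joining the buffer, instead of A's growing pending string whose single-quote count is recomputed over the whole accumulated string at every line.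
import Mathlib
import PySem

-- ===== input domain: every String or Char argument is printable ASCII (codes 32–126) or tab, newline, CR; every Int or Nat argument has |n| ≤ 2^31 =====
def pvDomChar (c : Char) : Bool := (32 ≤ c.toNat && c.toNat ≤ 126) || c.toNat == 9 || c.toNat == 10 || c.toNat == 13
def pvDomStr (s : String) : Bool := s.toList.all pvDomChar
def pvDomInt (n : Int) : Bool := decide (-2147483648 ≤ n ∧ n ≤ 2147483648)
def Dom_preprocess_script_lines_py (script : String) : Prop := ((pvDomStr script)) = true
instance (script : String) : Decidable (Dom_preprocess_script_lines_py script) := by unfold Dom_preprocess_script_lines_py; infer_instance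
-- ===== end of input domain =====

-- B replaces A's growing `pending` string that is re-counted in full each line by a line buffer
-- plus an incrementally maintained quote-parity bit (objective: alternative decomposition, no re-scan).

-- ===== PORT A =====
-- strings are handled as List Char internally (PySem.Chars), exact for Python str on the domain
def pvAloop : List String → List String → Option (List Char) → List String
  | [], raw_lines, pending =>
      match pending with
      | some p => raw_lines ++ [String.ofList p]
      | none => raw_lines
  | raw :: rest, raw_lines, pending =>
      let stripped := PySem.Chars.strip raw.toList
      if stripped.isEmpty then pvAloop rest raw_lines pending
      else
        match pending with
        | some p =>
            let p' := p ++ '\n' :: stripped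
            if PySem.Chars.count p' ['\''] % 2 == 0 then pvAloop rest (raw_lines ++ [String.ofList p']) none
            else pvAloop rest raw_lines (some p')
        | none =>
            if PySem.Chars.count stripped ['\''] % 2 ≠ 0 then pvAloop rest raw_lines (some stripped)
            else pvAloop rest (raw_lines ++ [String.ofList stripped]) none

def preprocess_script_lines_py (script : String) : List String :=
  pvAloop (PySem.Str.splitlines script) [] none

-- ===== PORT B =====
def pvBloop : List String → List String → List (List Char) → Bool → List String
  | [], out, buf, _ =>
      if buf.isEmpty then out else out ++ [String.ofList (PySem.Chars.join ['\n'] buf)]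
  | raw :: rest, out, buf, odd =>
      let stripped := PySem.Chars.strip raw.toList
      if stripped.isEmpty then pvBloop rest out buf odd
      else
        let buf' := buf ++ [stripped]
        let odd' := xor odd (PySem.Chars.count stripped ['\''] % 2 == 1)
        if odd' then pvBloop rest out buf' odd'
        else pvBloop rest (out ++ [String.ofList (PySem.Chars.join ['\n'] buf')]) [] odd'

def preprocess_script_lines_py_alt (script : String) : List String :=
  pvBloop (PySem.Str.splitlines script) [] [] false

-- ===== PRECONDITION & SPEC =====
def Spec_preprocess_script_lines_py (script : String) (out : List String) : Prop := out = preprocess_script_lines_py_alt script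
instance (script : String) (out : List String) : Decidable (Spec_preprocess_script_lines_py script out) := by unfold Spec_preprocess_script_lines_py; infer_instance

-- ===== CLAIM (what is proved, stated in full; the proofs are below) =====
def Claim_equal_preprocess_script_lines_py : Prop := ∀ (script : String), Dom_preprocess_script_lines_py script → Spec_preprocess_script_lines_py script (preprocess_script_lines_py script)

-- ===== LEMMAS AND PROOFS =====

-- Chars.count with a single-character needle is List.count
lemma count_go_single (c : Char) : ∀ (fuel : ℕ) (l : List Char) (acc : ℕ), l.length ≤ fuel →
    PySem.Chars.count.go [c] fuel l acc = acc + l.count c := by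
  intro fuel
  induction fuel with
  | zero =>
    intro l acc h
    cases l with
    | nil => simp [PySem.Chars.count.go]
    | cons x t => simp at h
  | succ n ih =>
    intro l acc h
    cases l with
    | nil => simp [PySem.Chars.count.go]
    | cons x t =>
      rw [PySem.Chars.count.go]
      simp only [List.isPrefixOf, List.isPrefixOf_nil_left, Bool.and_true, List.length_cons,
        List.length_singleton]
      by_cases hc : c = x
      · subst hc
        simp only [beq_self_eq_true, if_true, List.drop_succ_cons, List.length_nil,
          List.drop_zero]
        rw [ih t (acc + 1) (by simpa using h)]
        simp [List.count_cons]
        omega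
      · have hb : (c == x) = false := by simp [hc]
        simp only [hb]
        rw [ih t acc (by simpa using h)]
        simp [Ne.symm hc]

lemma count_single (cs : List Char) (c : Char) : PySem.Chars.count cs [c] = cs.count c := by
  simp [PySem.Chars.count, count_go_single c cs.length cs 0 le_rfl]

-- join over a nonempty buffer grows by sep ++ y at the right end
lemma join_append_singleton (sep y : List Char) :
    ∀ (x : List Char) (xs : List (List Char)),
      PySem.Chars.join sep (x :: xs ++ [y]) = PySem.Chars.join sep (x :: xs) ++ sep ++ y := by
  intro x xs
  induction xs generalizing x with
  | nil => simp [PySem.Chars.join, List.intercalate]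
  | cons z zs ih =>
    have h1 := ih z
    simp only [PySem.Chars.join, List.intercalate] at *
    simp [List.intersperse, List.flatten] at *
    simp [h1]

lemma parity_xor (a b : ℕ) : ((a + b) % 2 == 1) = xor (a % 2 == 1) (b % 2 == 1) := by
  rcases Nat.mod_two_eq_zero_or_one a with h | h <;>
    rcases Nat.mod_two_eq_zero_or_one b with h' | h' <;>
      simp [Nat.add_mod, h, h']

-- the two loops agree under the invariant: pending = join of buf, odd = its quote parity
lemma loop_eq : ∀ (lines acc : List String) (buf : List (List Char)),
    pvAloop lines acc (if buf.isEmpty then none else some (PySem.Chars.join ['\n'] buf))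
      = pvBloop lines acc buf (PySem.Chars.count (PySem.Chars.join ['\n'] buf) ['\''] % 2 == 1) := by
  intro lines
  induction lines with
  | nil =>
    intro acc buf
    cases buf with
    | nil => simp [pvAloop, pvBloop]
    | cons x xs => simp [pvAloop, pvBloop]
  | cons raw rest ih =>
    intro acc buf
    cases buf with
    | nil =>
      have hodd0 : (PySem.Chars.count (PySem.Chars.join ['\n'] ([] : List (List Char))) ['\''] % 2 == 1) = false := by decide
      simp only [List.isEmpty_nil, if_true]
      rw [pvAloop, pvBloop]
      by_cases hs : (PySem.Chars.strip raw.toList).isEmpty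
      · simp only [hs, if_true]
        simpa using ih acc []
      · set s := PySem.Chars.strip raw.toList with hsdef
        have hj1 : PySem.Chars.join ['\n'] [s] = s := PySem.Chars.join_singleton _ _
        rw [hodd0]
        by_cases hc : PySem.Chars.count s ['\''] % 2 ≠ 0
        · have hc' : (PySem.Chars.count s ['\''] % 2 == 1) = true := by
            rcases Nat.mod_two_eq_zero_or_one (PySem.Chars.count s ['\'']) with h | h
            · exact absurd h hc
            · simp [h]
          have hrec := ih acc [s]
          simp only [List.isEmpty_cons, Bool.false_eq_true, if_false, hj1, hc'] at hrec
          simp [hs, hc, hc', hrec]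
        · have h0 : PySem.Chars.count s ['\''] % 2 = 0 := by omega
          have hc' : (PySem.Chars.count s ['\''] % 2 == 1) = false := by simp [h0]
          have hrec := ih (acc ++ [String.ofList s]) []
          simp only [List.isEmpty_nil, if_true, hodd0] at hrec
          simp [hs, hc, hc', hrec]
    | cons x xs =>
      simp only [List.isEmpty_cons, Bool.false_eq_true, if_false]
      rw [pvAloop, pvBloop]
      by_cases hs : (PySem.Chars.strip raw.toList).isEmpty
      · have hrec := ih acc (x :: xs)
        simp only [List.isEmpty_cons, Bool.false_eq_true, if_false] at hrec
        simp [hs, hrec]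
      · set s := PySem.Chars.strip raw.toList with hsdef
        have hjoin : PySem.Chars.join ['\n'] ((x :: xs) ++ [s])
            = PySem.Chars.join ['\n'] (x :: xs) ++ '\n' :: s := by
          rw [join_append_singleton]; simp
        have hcount : PySem.Chars.count (PySem.Chars.join ['\n'] (x :: xs) ++ '\n' :: s) ['\'']
            = PySem.Chars.count (PySem.Chars.join ['\n'] (x :: xs)) ['\''] + PySem.Chars.count s ['\''] := by
          simp [count_single, List.count_append]
        have hpar : (PySem.Chars.count (PySem.Chars.join ['\n'] (x :: xs) ++ '\n' :: s) ['\''] % 2 == 1)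
            = xor (PySem.Chars.count (PySem.Chars.join ['\n'] (x :: xs)) ['\''] % 2 == 1)
                  (PySem.Chars.count s ['\''] % 2 == 1) := by
          rw [hcount, parity_xor]
        by_cases he : PySem.Chars.count (PySem.Chars.join ['\n'] (x :: xs) ++ '\n' :: s) ['\''] % 2 = 0
        · have hodd' : xor (PySem.Chars.count (PySem.Chars.join ['\n'] (x :: xs)) ['\''] % 2 == 1)
              (PySem.Chars.count s ['\''] % 2 == 1) = false := by
            rw [← hpar]; simp [he]
          have hrec := ih (acc ++ [String.ofList (PySem.Chars.join ['\n'] ((x :: xs) ++ [s]))]) []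
          have hodd0 : (PySem.Chars.count (PySem.Chars.join ['\n'] ([] : List (List Char))) ['\''] % 2 == 1) = false := by decide
          simp only [List.isEmpty_nil, if_true, hodd0] at hrec
          rw [hjoin] at hrec
          simp only [hs, Bool.false_eq_true, if_false, hodd', hjoin]
          simpa [he] using hrec
        · have hodd' : xor (PySem.Chars.count (PySem.Chars.join ['\n'] (x :: xs)) ['\''] % 2 == 1)
              (PySem.Chars.count s ['\''] % 2 == 1) = true := by
            rw [← hpar]
            rcases Nat.mod_two_eq_zero_or_one (PySem.Chars.count (PySem.Chars.join ['\n'] (x :: xs) ++ '\n' :: s) ['\'']) with h | h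
            · exact absurd h he
            · simp [h]
          have he' : (PySem.Chars.count (PySem.Chars.join ['\n'] (x :: xs) ++ '\n' :: s) ['\''] % 2 == 0) = false := by
            simp [he]
          have hrec := ih acc ((x :: xs) ++ [s])
          rw [if_neg (by simp)] at hrec
          rw [hjoin, hpar, hodd'] at hrec
          simp only [hs, Bool.false_eq_true, if_false, hodd', if_true, hjoin]
          rw [if_neg (by simp [he'])]
          exact hrec

-- ===== VERDICT (by name: the statement is the Claim_ definition above) =====
theorem preprocess_script_lines_py_spec : Claim_equal_preprocess_script_lines_py := by
  intro script _
  unfold Spec_preprocess_script_lines_py preprocess_script_lines_py preprocess_script_lines_py_alt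
  have := loop_eq (PySem.Str.splitlines script) [] []
  simpa using this
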